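-- pv_equiv track=rewrite | github.com/sepandhaghighi/verilogparser | main.py | moduleExtractor
-- ===== SOURCE A (Python) =====
-- def moduleExtractor(splitData):
--
--     moduleSection=[]
--     inputSection=[]
--     wireSection=[]
--     outputSection=[]
--     for item in splitData:
--         if (item.find("module")!=-1) and (item.find("endmodule")==-1):
--             index_1 = item.find("(")
--             index_2 = item.find(")")
--             moduleSection=list(map(str.strip,item[index_1+1:index_2].replace("\n","").split(",")))
--         if item.find("input")!=-1:
--             inputSection=list(map(str.strip,item[8:].replace("\n","").split(",")))
--         if item.find('wire')!=-1:
--             wireSection = list(map(str.strip, item[7:].replace("\n", "").split(",")))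
--         if item.find('output')!=-1:
--             outputSection = list(map(str.strip, item[9:].replace("\n", "").split(",")))
--
--
--     return (moduleSection,inputSection,wireSection,outputSection)
-- ===== SOURCE B (Python) =====
-- def moduleExtractor(splitData):
--     def proc(s):
--         return [p.strip() for p in s.replace("\n", "").split(",")]
--
--     def last(pred):
--         for item in reversed(splitData):
--             if pred(item):
--                 return item
--         return None
--
--     m = last(lambda it: "module" in it and "endmodule" not in it)
--     i = last(lambda it: "input" in it)
--     w = last(lambda it: "wire" in it)
--     o = last(lambda it: "output" in it)
--     return (
--         proc(m[m.find("(") + 1:m.find(")")]) if m is not None else [],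
--         proc(i[8:]) if i is not None else [],
--         proc(w[7:]) if w is not None else [],
--         proc(o[9:]) if o is not None else [],
--     )
-- ===== Notes on version B (the rewrite author's own statement) =====
-- stated objective: simpler
-- what changed: Replaces A's single interleaved loop with four state components and overwriting branches by four independent last-match searches (scan reversed, first hit) plus one shared strip/replace/split helper applied per section.
import Mathlib
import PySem

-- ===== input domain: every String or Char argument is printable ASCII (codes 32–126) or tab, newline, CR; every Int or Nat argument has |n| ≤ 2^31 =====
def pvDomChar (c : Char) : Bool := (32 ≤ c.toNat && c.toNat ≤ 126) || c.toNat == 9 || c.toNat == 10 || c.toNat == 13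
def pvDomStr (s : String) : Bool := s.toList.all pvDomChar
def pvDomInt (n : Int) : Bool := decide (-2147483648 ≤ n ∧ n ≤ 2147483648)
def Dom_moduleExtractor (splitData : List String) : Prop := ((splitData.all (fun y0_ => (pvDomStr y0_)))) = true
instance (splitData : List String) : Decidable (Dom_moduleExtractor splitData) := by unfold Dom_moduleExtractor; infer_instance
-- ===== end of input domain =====

-- B replaces A's single interleaved loop (four overwriting branches) by four independent
-- last-match searches, one per section, sharing one processing helper (objective: simpler).

-- ===== PORT A =====
-- one fold over splitData; the state is the four sections, each branch overwrites its component
def moduleExtractor (splitData : List String) : List String × List String × List String × List String :=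
  splitData.foldl
    (fun acc item =>
      (if PySem.Str.find item "module" != -1 && PySem.Str.find item "endmodule" == -1 then
          ((PySem.Str.split? (PySem.Str.replace
              (PySem.Str.slice item (some (PySem.Str.find item "(" + 1)) (some (PySem.Str.find item ")")))
              "\n" "") ",").getD []).map PySem.Str.strip
        else acc.1,
       if PySem.Str.find item "input" != -1 then
          ((PySem.Str.split? (PySem.Str.replace (PySem.Str.slice item (some 8) none) "\n" "") ",").getD []).map PySem.Str.strip
        else acc.2.1,
       if PySem.Str.find item "wire" != -1 then
          ((PySem.Str.split? (PySem.Str.replace (PySem.Str.slice item (some 7) none) "\n" "") ",").getD []).map PySem.Str.strip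
        else acc.2.2.1,
       if PySem.Str.find item "output" != -1 then
          ((PySem.Str.split? (PySem.Str.replace (PySem.Str.slice item (some 9) none) "\n" "") ",").getD []).map PySem.Str.strip
        else acc.2.2.2))
    ([], [], [], [])

-- ===== PORT B =====
-- shared processing helper: strip each piece of s.replace("\n","").split(",")
def pvProc (s : String) : List String :=
  ((PySem.Str.split? (PySem.Str.replace s "\n" "") ",").getD []).map PySem.Str.strip

-- last item of xs satisfying p (Source B scans reversed(splitData) and returns the first hit)
def pvLast (p : String → Bool) (xs : List String) : Option String :=
  xs.reverse.find? p

def moduleExtractor_alt (splitData : List String) : List String × List String × List String × List String :=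
  let m := pvLast (fun it => PySem.Str.isIn "module" it && !PySem.Str.isIn "endmodule" it) splitData
  let i := pvLast (fun it => PySem.Str.isIn "input" it) splitData
  let w := pvLast (fun it => PySem.Str.isIn "wire" it) splitData
  let o := pvLast (fun it => PySem.Str.isIn "output" it) splitData
  (match m with
    | some it => pvProc (PySem.Str.slice it (some (PySem.Str.find it "(" + 1)) (some (PySem.Str.find it ")")))
    | none => [],
   match i with
    | some it => pvProc (PySem.Str.slice it (some 8) none)
    | none => [],
   match w with
    | some it => pvProc (PySem.Str.slice it (some 7) none)
    | none => [],
   match o with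
    | some it => pvProc (PySem.Str.slice it (some 9) none)
    | none => [])

-- ===== PRECONDITION & SPEC =====
def Spec_moduleExtractor (splitData : List String) (out : List String × List String × List String × List String) : Prop := out = moduleExtractor_alt splitData
instance (splitData : List String) (out : List String × List String × List String × List String) : Decidable (Spec_moduleExtractor splitData out) := by unfold Spec_moduleExtractor; infer_instance

-- ===== CLAIM (what is proved, stated in full; the proofs are below) =====
def Claim_equal_moduleExtractor : Prop := ∀ (splitData : List String), Dom_moduleExtractor splitData → Spec_moduleExtractor splitData (moduleExtractor splitData)

-- ===== LEMMAS AND PROOFS =====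

-- a fold whose step updates the four components independently is four independent folds
theorem pv_foldl_prod4 {α β γ δ ε : Type} (u : α → ε → α) (v : β → ε → β) (w : γ → ε → γ) (z : δ → ε → δ) :
    ∀ (xs : List ε) (a : α) (b : β) (c : γ) (d : δ),
      xs.foldl (fun acc it => (u acc.1 it, v acc.2.1 it, w acc.2.2.1 it, z acc.2.2.2 it)) (a, b, c, d)
        = (xs.foldl u a, xs.foldl v b, xs.foldl w c, xs.foldl z d) := by
  intro xs
  induction xs with
  | nil => intro a b c d; rfl
  | cons x xs ih => intro a b c d; simpa [List.foldl] using ih (u a x) (v b x) (w c x) (z d x)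

-- "last matching item wins, else the initial value" is what the overwrite-fold computes
theorem pv_foldl_if_last {α : Type} (p : String → Bool) (f : String → α) :
    ∀ (xs : List String) (init : α),
      xs.foldl (fun a it => if p it then f it else a) init
        = (match xs.reverse.find? p with | some it => f it | none => init) := by
  intro xs
  induction xs with
  | nil => intro init; rfl
  | cons x xs ih =>
      intro init
      simp only [List.foldl, List.reverse_cons, List.find?_append]
      rw [ih]
      cases h : xs.reverse.find? p with
      | some it => simp [Option.or]
      | none => simp [Option.or, List.find?]; split <;> simp_all

-- "sub in s"  =  "s.find(sub) != -1"
theorem pv_isIn_eq_find (sub s : String) :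
    PySem.Str.isIn sub s = (PySem.Str.find s sub != -1) := by
  simp only [PySem.Str.isIn_eq, PySem.Str.find_eq]
  by_cases h : sub.toList <:+: s.toList
  · simp [(PySem.Chars.isIn_iff_infix _ _).mpr h, bne_iff_ne,
      (PySem.Chars.find_ne_neg_one_iff _ _).mpr h]
  · have h1 : PySem.Chars.isIn sub.toList s.toList = false :=
      (PySem.Chars.isIn_eq_false_iff _ _).mpr h
    have h2 : PySem.Chars.find s.toList sub.toList = -1 := by
      by_contra hne
      exact h ((PySem.Chars.find_ne_neg_one_iff _ _).mp hne)
    simp [h1, h2]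

-- the whole of A's fold, against four last-match lookups
theorem pv_main (p1 p2 p3 p4 : String → Bool) (f1 f2 f3 f4 : String → List String)
    (xs : List String) :
    xs.foldl
      (fun acc it =>
        (if p1 it then f1 it else acc.1,
         if p2 it then f2 it else acc.2.1,
         if p3 it then f3 it else acc.2.2.1,
         if p4 it then f4 it else acc.2.2.2)) ([], [], [], [])
      = (match xs.reverse.find? p1 with | some it => f1 it | none => [],
         match xs.reverse.find? p2 with | some it => f2 it | none => [],
         match xs.reverse.find? p3 with | some it => f3 it | none => [],
         match xs.reverse.find? p4 with | some it => f4 it | none => []) := by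
  rw [pv_foldl_prod4 (fun a it => if p1 it then f1 it else a) (fun a it => if p2 it then f2 it else a)
        (fun a it => if p3 it then f3 it else a) (fun a it => if p4 it then f4 it else a),
      pv_foldl_if_last p1 f1, pv_foldl_if_last p2 f2, pv_foldl_if_last p3 f3, pv_foldl_if_last p4 f4]

-- ===== VERDICT (by name: the statement is the Claim_ definition above) =====
theorem moduleExtractor_spec : Claim_equal_moduleExtractor := by
  intro splitData _
  show moduleExtractor splitData = moduleExtractor_alt splitData
  unfold moduleExtractor moduleExtractor_alt pvLast pvProc
  have hpm : (fun it => PySem.Str.isIn "module" it && !PySem.Str.isIn "endmodule" it)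
      = (fun it => PySem.Str.find it "module" != -1 && PySem.Str.find it "endmodule" == -1) := by
    funext it
    rw [pv_isIn_eq_find, pv_isIn_eq_find]
    cases hm : (PySem.Str.find it "module" != -1) <;>
      cases he : (PySem.Str.find it "endmodule" != -1) <;> simp_all [bne_iff_ne]
  have hpi : (fun it => PySem.Str.isIn "input" it) = (fun it => PySem.Str.find it "input" != -1) := by
    funext it; exact pv_isIn_eq_find _ _
  have hpw : (fun it => PySem.Str.isIn "wire" it) = (fun it => PySem.Str.find it "wire" != -1) := by
    funext it; exact pv_isIn_eq_find _ _
  have hpo : (fun it => PySem.Str.isIn "output" it) = (fun it => PySem.Str.find it "output" != -1) := by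
    funext it; exact pv_isIn_eq_find _ _
  rw [hpm, hpi, hpw, hpo]
  exact pv_main _ _ _ _ _ _ _ _ splitData
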